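-- pv_equiv track=rewrite | github.com/MRAWAY77/motive_scoring_project | code_version3.py | Nerror_sentence
-- ===== SOURCE A (Python) =====
-- def Nerror_sentence(Input,filtered,invalid,mistake):
-- 	errorN = len(invalid)
-- 	for element in Input:
-- 		for nodes in filtered:
-- 			if nodes[-1] == element[-1]:
-- 				errorN-=1
--
-- 	mistake = abs(errorN)
-- 	return mistake
-- ===== SOURCE B (Python) =====
-- def Nerror_sentence(Input, filtered, invalid, mistake):
--     if not Input or not filtered:
--         return abs(len(invalid))
--     counts = {}
--     for nodes in filtered:
--         c = nodes[-1]
--         counts[c] = counts.get(c, 0) + 1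
--     total = sum(counts.get(element[-1], 0) for element in Input)
--     return abs(len(invalid) - total)
-- ===== Notes on version B (the rewrite author's own statement) =====
-- stated objective: faster
-- what changed: Replaces the nested Input x filtered scan by a one-pass dict counting last characters of filtered, then one pass over Input summing lookups.
import Mathlib
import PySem

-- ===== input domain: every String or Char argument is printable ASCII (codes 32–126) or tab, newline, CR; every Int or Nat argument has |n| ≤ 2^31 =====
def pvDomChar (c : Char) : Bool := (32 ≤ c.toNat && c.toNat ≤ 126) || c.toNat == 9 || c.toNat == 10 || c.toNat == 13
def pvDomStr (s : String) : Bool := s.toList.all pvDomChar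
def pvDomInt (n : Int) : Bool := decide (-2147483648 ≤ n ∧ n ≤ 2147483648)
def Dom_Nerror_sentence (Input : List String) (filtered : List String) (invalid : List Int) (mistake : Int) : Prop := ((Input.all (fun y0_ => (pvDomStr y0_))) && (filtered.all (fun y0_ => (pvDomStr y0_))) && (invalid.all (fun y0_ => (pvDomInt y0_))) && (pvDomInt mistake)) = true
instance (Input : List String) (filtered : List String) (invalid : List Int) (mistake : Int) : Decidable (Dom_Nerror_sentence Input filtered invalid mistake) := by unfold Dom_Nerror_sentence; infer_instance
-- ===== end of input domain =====

-- B replaces A's nested Input×filtered scan with a one-pass dict of last-character counts (asymptotically faster).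


-- ===== PORT A =====
-- s[-1] as an Option Char (none = IndexError); inside Pre_ every accessed string is nonempty
def pvLastC (s : String) : Option Char := PySem.Str.pyGet? s (-1)

def Nerror_sentence (Input : List String) (filtered : List String) (invalid : List Int) (mistake : Int) : Int :=
  let errorN : Int := Input.foldl (fun acc element =>
    filtered.foldl (fun a nodes => if pvLastC nodes == pvLastC element then a - 1 else a) acc)
    (invalid.length : Int)
  |errorN|

-- ===== PORT B =====
def Nerror_sentence_alt (Input : List String) (filtered : List String) (invalid : List Int) (mistake : Int) : Int :=
  if Input = [] ∨ filtered = [] then |(invalid.length : Int)|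
  else
    let counts : PySem.Dict (Option Char) Int :=
      filtered.foldl (fun d nodes => d.insert (pvLastC nodes) (d.getD (pvLastC nodes) 0 + 1)) PySem.Dict.empty
    let total : Int := Input.foldl (fun s element => s + counts.getD (pvLastC element) 0) 0
    |(invalid.length : Int) - total|

-- ===== PRECONDITION & SPEC =====
-- Pre_ excludes exactly the inputs on which Python A raises IndexError: when both lists are
-- nonempty A indexes every string of both lists with [-1], so an empty string there raises.
def Pre_Nerror_sentence (Input : List String) (filtered : List String) (invalid : List Int) (mistake : Int) : Prop :=
  Input = [] ∨ filtered = [] ∨ ((∀ s ∈ Input, s ≠ "") ∧ (∀ s ∈ filtered, s ≠ ""))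
instance (Input : List String) (filtered : List String) (invalid : List Int) (mistake : Int) : Decidable (Pre_Nerror_sentence Input filtered invalid mistake) := by unfold Pre_Nerror_sentence; infer_instance

def pvWitness_Nerror_sentence : List String × List String × List Int × Int := (["ab", "c"], ["b"], [1, 2], 0)

def Spec_Nerror_sentence (Input : List String) (filtered : List String) (invalid : List Int) (mistake : Int) (out : Int) : Prop := out = Nerror_sentence_alt Input filtered invalid mistake
instance (Input : List String) (filtered : List String) (invalid : List Int) (mistake : Int) (out : Int) : Decidable (Spec_Nerror_sentence Input filtered invalid mistake out) := by unfold Spec_Nerror_sentence; infer_instance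

-- ===== CLAIM (what is proved, stated in full; the proofs are below) =====
def Claim_equal_Nerror_sentence : Prop := ∀ (Input : List String) (filtered : List String) (invalid : List Int) (mistake : Int), Dom_Nerror_sentence Input filtered invalid mistake → Pre_Nerror_sentence Input filtered invalid mistake → Spec_Nerror_sentence Input filtered invalid mistake (Nerror_sentence Input filtered invalid mistake)

-- ===== LEMMAS AND PROOFS =====

-- A's inner loop over `filtered` subtracts one per match of last characters.
theorem pv_inner (filtered : List String) (e : String) (acc : Int) :
    filtered.foldl (fun a nodes => if pvLastC nodes == pvLastC e then a - 1 else a) acc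
      = acc - ((filtered.map pvLastC).count (pvLastC e) : Int) := by
  induction filtered generalizing acc with
  | nil => simp
  | cons x xs ih =>
    simp only [List.foldl_cons, List.map_cons, List.count_cons, ih]
    by_cases h : (pvLastC x == pvLastC e) = true
    · simp only [h, if_true]; push_cast; ring
    · simp only [h]; push_cast; ring

-- A's outer loop subtracts, B's sums; they shift against each other.
theorem pv_outer (Input : List String) (f : String → Int) (n : Int) :
    Input.foldl (fun acc e => acc - f e) n
      = n - Input.foldl (fun s e => s + f e) 0 := by
  have h : ∀ (l : List String) (n m : Int),
      l.foldl (fun acc e => acc - f e) n = n - (l.foldl (fun s e => s + f e) m - m) := by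
    intro l
    induction l with
    | nil => intro n m; simp
    | cons x xs ih =>
      intro n m
      simp only [List.foldl_cons]
      rw [ih (n - f x) (m + f x)]
      ring
  simpa using h Input n 0

-- B's counter lookup is the count of last characters in `filtered`.
theorem pv_counts (filtered : List String) (v : Option Char) :
    ((filtered.foldl (fun d nodes => d.insert (pvLastC nodes) (d.getD (pvLastC nodes) 0 + 1))
        (PySem.Dict.empty : PySem.Dict (Option Char) Int)).getD v 0)
      = ((filtered.map pvLastC).count v : Int) := by
  have h := PySem.Dict.getD_foldl_insert_add_one (filtered.map pvLastC)
    (PySem.Dict.empty : PySem.Dict (Option Char) Int) v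
  rw [List.foldl_map] at h
  simpa using h

-- ===== VERDICT (by name: the statement is the Claim_ definition above) =====
theorem Nerror_sentence_spec : Claim_equal_Nerror_sentence := by
  intro Input filtered invalid mistake _ _
  unfold Spec_Nerror_sentence Nerror_sentence Nerror_sentence_alt
  by_cases hI : Input = []
  · subst hI; simp
  · by_cases hF : filtered = []
    · subst hF
      simp only [hI, or_true, if_true]
      simp [List.foldl_fixed]
    · simp only [hI, hF, or_self, if_false]
      simp only [pv_counts]
      have h1 : ∀ acc e, filtered.foldl (fun a nodes => if pvLastC nodes == pvLastC e then a - 1 else a) acc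
          = acc - ((filtered.map pvLastC).count (pvLastC e) : Int) := fun acc e => pv_inner filtered e acc
      simp only [h1]
      rw [pv_outer Input (fun e => ((filtered.map pvLastC).count (pvLastC e) : Int)) (invalid.length : Int)]
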